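-- pv_equiv track=rewrite | github.com/ShapeLayer/training | tasks/online_judge/baekjoon/python/14888.py | compute
-- ===== SOURCE A (Python) =====
-- MAX = int(1e10)
--
-- MIN = -MAX
--
-- def compute(n: int, arr: list[int], remains: list[int]) -> tuple[int]:
--     def calculate(prev: int, now: int, operator: int) -> int:
--         if operator == 0:
--             return prev + now
--         if operator == 1:
--             return prev - now
--         if operator == 2:
--             return prev * now
--         if operator == 3:
--             if prev < 0:
--                 return -((-prev) // now)
--             return prev // now
--     def step(calced: int, idx: int, remains: list[int], mx: int, mn: int):
--         if idx == n:
--             if mx < calced: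
--                 mx = calced
--             if mn > calced:
--                 mn = calced
--             return mx, mn
--         for i in range(4):
--             if remains[i]:
--                 remains[i] -= 1
--                 resmx, resmn = step(calculate(calced, arr[idx], i), idx + 1, remains, mx, mn)
--                 remains[i] += 1
--                 if mx < resmx:
--                     mx = resmx
--                 if mn > resmn:
--                     mn = resmn
--         return mx, mn
--     mx, mn = step(arr[0], 1, remains, MIN, MAX)
--     return mx, mn
-- ===== SOURCE B (Python) =====
-- MAX = int(1e10)
--
-- MIN = -MAX
--
--
-- def compute(n: int, arr: list[int], remains: list[int]) -> tuple[int]: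
--     def calculate(prev: int, now: int, operator: int) -> int:
--         if operator == 0:
--             return prev + now
--         if operator == 1:
--             return prev - now
--         if operator == 2:
--             return prev * now
--         if operator == 3:
--             if prev < 0:
--                 return -((-prev) // now)
--             return prev // now
--
--     # Breadth-first: keep an explicit frontier of (value, remaining-counts) states,
--     # expand it one operand position at a time, then reduce the final values.
--     states = [(arr[0], tuple(remains))]
--     for idx in range(1, n):
--         now = arr[idx]
--         nxt = []
--         for val, cnt in states:
--             for i in range(4):
--                 if cnt[i]:
--                     nxt.append((calculate(val, now, i),
--                                 cnt[:i] + (cnt[i] - 1,) + cnt[i + 1:]))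
--         states = nxt
--     mx, mn = MIN, MAX
--     for val, _ in states:
--         if val > mx:
--             mx = val
--         if val < mn:
--             mn = val
--     return mx, mn
-- ===== Notes on version B (the rewrite author's own statement) =====
-- stated objective: alternative
-- what changed: A's accumulator-threading recursive backtracking (DFS with in-place decrement/restore of the operator counts) is replaced by an iterative breadth-first search: an explicit frontier of (value, remaining-counts) states is expanded one operand position at a time and the final frontier is reduced with max/min.
-- outside the precondition, e.g. on compute(0, [5], [0, 0, 0, 0]): A returns (-10000000000, 10000000000), B returns (5, 5); on compute(4, [-2, 0, 5], [1, 0, 1, 0]): A returns (-10000000000, 10000000000), B raises IndexError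
import Mathlib
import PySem

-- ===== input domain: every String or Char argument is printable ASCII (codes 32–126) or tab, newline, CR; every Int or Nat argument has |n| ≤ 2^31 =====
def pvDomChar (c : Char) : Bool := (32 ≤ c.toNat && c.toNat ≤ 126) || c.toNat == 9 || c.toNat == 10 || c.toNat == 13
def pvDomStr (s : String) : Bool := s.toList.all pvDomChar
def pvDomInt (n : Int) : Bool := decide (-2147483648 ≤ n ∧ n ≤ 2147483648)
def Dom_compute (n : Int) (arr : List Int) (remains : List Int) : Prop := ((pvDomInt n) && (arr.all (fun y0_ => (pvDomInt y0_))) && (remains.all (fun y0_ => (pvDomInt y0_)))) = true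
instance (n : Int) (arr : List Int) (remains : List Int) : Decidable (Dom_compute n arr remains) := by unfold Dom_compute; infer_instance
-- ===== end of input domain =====

-- B replaces A's accumulator-threading backtracking DFS by an iterative breadth-first
-- frontier of (value, remaining-counts) states with a final max/min reduction (alternative
-- decomposition, same cost). Return-value equivalence only; A restores its in-place edits.

-- ===== PORT A =====
def pvMAX : Int := 10000000000
def pvMIN : Int := -10000000000

-- calculate(prev, now, operator); callers only pass operator ∈ {0,1,2,3}
def pvCalc (prev now operator : Int) : Int :=
  if operator = 0 then prev + now
  else if operator = 1 then prev - now
  else if operator = 2 then prev * now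
  else if prev < 0 then -(PySem.Int.floordiv (-prev) now)  -- ZeroDivisionError (now = 0) excluded by Pre_
  else PySem.Int.floordiv prev now

-- step(calced, idx, remains, mx, mn).  fuel = (n - idx).toNat is the exact recursion depth
-- of the Python (idx rises by 1 until idx == n); fuel 0 with idx ≠ n is only reachable when
-- n < 1, where the Python diverges/raises (excluded by Pre_).  remains[i] is read with
-- pyGetD (IndexError excluded by Pre_); the Python's decrement-then-restore of remains[i]
-- is the immutable rem.set on the recursive call only.
def computeStep (n : Int) (arr : List Int) (fuel : Nat) (calced idx : Int)
    (rem : List Int) (mx mn : Int) : Int × Int :=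
  if idx = n then
    (if mx < calced then calced else mx, if mn > calced then calced else mn)
  else
    match fuel with
    | 0 => (mx, mn)
    | f + 1 =>
      (List.range 4).foldl (fun (acc : Int × Int) (i : Nat) =>
        if PySem.List.pyGetD rem (i : Int) 0 ≠ 0 then
          let res := computeStep n arr f
            (pvCalc calced (PySem.List.pyGetD arr idx 0) (i : Int)) (idx + 1)
            (rem.set i (PySem.List.pyGetD rem (i : Int) 0 - 1)) acc.1 acc.2
          (if acc.1 < res.1 then res.1 else acc.1, if acc.2 > res.2 then res.2 else acc.2)
        else acc) (mx, mn)

def compute (n : Int) (arr : List Int) (remains : List Int) : Int × Int :=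
  computeStep n arr (n - 1).toNat (PySem.List.pyGetD arr 0 0) 1 remains pvMIN pvMAX

-- ===== PORT B =====
-- cnt[:i] + (cnt[i]-1,) + cnt[i+1:] is exactly the list with entry i decremented: List.set
def compute_alt (n : Int) (arr : List Int) (remains : List Int) : Int × Int :=
  let states : List (Int × List Int) := [(PySem.List.pyGetD arr 0 0, remains)]
  let states := (PySem.List.pyRange 1 n 1).foldl (fun states idx =>
    let now := PySem.List.pyGetD arr idx 0
    states.foldl (fun nxt vc =>
      (List.range 4).foldl (fun nxt (i : Nat) =>
        if PySem.List.pyGetD vc.2 (i : Int) 0 ≠ 0 then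
          nxt ++ [(pvCalc vc.1 now (i : Int), vc.2.set i (PySem.List.pyGetD vc.2 (i : Int) 0 - 1))]
        else nxt) nxt) []) states
  states.foldl (fun (acc : Int × Int) vc =>
    (if acc.1 < vc.1 then vc.1 else acc.1, if acc.2 > vc.1 then vc.1 else acc.2)) (pvMIN, pvMAX)

-- ===== PRECONDITION & SPEC =====
-- Pre_ restricts to the problem's natural domain: 1 ≤ n ≤ len(arr) (outside it A raises
-- IndexError/RecursionError or returns its (MIN, MAX) sentinels from a search that dies
-- before ever completing an expression), remains long enough for the 4 operator slots A
-- indexes when n ≥ 2, and no reachable division by a zero operand (ZeroDivisionError).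
def Pre_compute (n : Int) (arr : List Int) (remains : List Int) : Prop :=
  1 ≤ n ∧ n ≤ (arr.length : Int) ∧ (n = 1 ∨ 4 ≤ remains.length) ∧
  ¬ (remains.getD 3 0 ≠ 0 ∧ ∃ i ∈ List.range arr.length, 1 ≤ i ∧ (i : Int) < n ∧
      arr.getD i 0 = 0 ∧
      (remains.getD 3 0 < 0 ∨ (∃ j ∈ List.range 4, remains.getD j 0 < 0) ∨
        (i : Int) ≤ (List.range 4).foldl (fun s j => s + max (remains.getD j 0) 0) 0))
instance (n : Int) (arr : List Int) (remains : List Int) : Decidable (Pre_compute n arr remains) := by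
  unfold Pre_compute; infer_instance

def pvWitness_compute : Int × List Int × List Int := (3, [5, 2, 3], [1, 1, 0, 0])

def Spec_compute (n : Int) (arr : List Int) (remains : List Int) (out : Int × Int) : Prop := out = compute_alt n arr remains
instance (n : Int) (arr : List Int) (remains : List Int) (out : Int × Int) : Decidable (Spec_compute n arr remains out) := by unfold Spec_compute; infer_instance

-- ===== CLAIM (what is proved, stated in full; the proofs are below) =====
def Claim_equal_compute : Prop := ∀ (n : Int) (arr : List Int) (remains : List Int), Dom_compute n arr remains → Pre_compute n arr remains → Spec_compute n arr remains (compute n arr remains)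

-- ===== LEMMAS AND PROOFS =====

-- the values of all completed expressions, in DFS (lexicographic) order
def pvLeaves (n : Int) (arr : List Int) (fuel : Nat) (calced idx : Int)
    (rem : List Int) : List Int :=
  if idx = n then [calced]
  else
    match fuel with
    | 0 => []
    | f + 1 =>
      (List.range 4).foldl (fun acc (i : Nat) =>
        if PySem.List.pyGetD rem (i : Int) 0 ≠ 0 then
          acc ++ pvLeaves n arr f
            (pvCalc calced (PySem.List.pyGetD arr idx 0) (i : Int)) (idx + 1)
            (rem.set i (PySem.List.pyGetD rem (i : Int) 0 - 1))
        else acc) []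

def pvFMax (a b : Int) : Int := if a < b then b else a
def pvFMin (a b : Int) : Int := if a > b then b else a

theorem le_foldl_fMax (l : List Int) : ∀ a : Int, a ≤ l.foldl pvFMax a := by
  induction l with
  | nil => intro a; simp
  | cons x xs ih =>
    intro a
    have h1 : a ≤ pvFMax a x := by simp only [pvFMax]; split <;> omega
    exact le_trans h1 (ih _)

theorem foldl_fMin_le (l : List Int) : ∀ a : Int, l.foldl pvFMin a ≤ a := by
  induction l with
  | nil => intro a; simp
  | cons x xs ih =>
    intro a
    have h1 : pvFMin a x ≤ a := by simp only [pvFMin]; split <;> omega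
    exact le_trans (ih _) h1

-- equation lemmas for computeStep / pvLeaves
theorem computeStep_base (n : Int) (arr : List Int) (fuel : Nat) (calced idx : Int)
    (rem : List Int) (mx mn : Int) (h : idx = n) :
    computeStep n arr fuel calced idx rem mx mn =
      (if mx < calced then calced else mx, if mn > calced then calced else mn) := by
  unfold computeStep; simp [h]

theorem computeStep_zero (n : Int) (arr : List Int) (calced idx : Int)
    (rem : List Int) (mx mn : Int) (h : ¬ idx = n) :
    computeStep n arr 0 calced idx rem mx mn = (mx, mn) := by
  unfold computeStep; simp [h]

theorem computeStep_succ (n : Int) (arr : List Int) (f : Nat) (calced idx : Int)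
    (rem : List Int) (mx mn : Int) (h : ¬ idx = n) :
    computeStep n arr (f + 1) calced idx rem mx mn =
      (List.range 4).foldl (fun (acc : Int × Int) (i : Nat) =>
        if PySem.List.pyGetD rem (i : Int) 0 ≠ 0 then
          let res := computeStep n arr f
            (pvCalc calced (PySem.List.pyGetD arr idx 0) (i : Int)) (idx + 1)
            (rem.set i (PySem.List.pyGetD rem (i : Int) 0 - 1)) acc.1 acc.2
          (if acc.1 < res.1 then res.1 else acc.1, if acc.2 > res.2 then res.2 else acc.2)
        else acc) (mx, mn) := by
  conv_lhs => unfold computeStep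
  simp [h]

theorem pvLeaves_base (n : Int) (arr : List Int) (fuel : Nat) (calced idx : Int)
    (rem : List Int) (h : idx = n) :
    pvLeaves n arr fuel calced idx rem = [calced] := by
  unfold pvLeaves; simp [h]

theorem pvLeaves_zero (n : Int) (arr : List Int) (calced idx : Int)
    (rem : List Int) (h : ¬ idx = n) :
    pvLeaves n arr 0 calced idx rem = [] := by
  unfold pvLeaves; simp [h]

theorem pvLeaves_succ (n : Int) (arr : List Int) (f : Nat) (calced idx : Int)
    (rem : List Int) (h : ¬ idx = n) :
    pvLeaves n arr (f + 1) calced idx rem =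
      (List.range 4).foldl (fun acc (i : Nat) =>
        if PySem.List.pyGetD rem (i : Int) 0 ≠ 0 then
          acc ++ pvLeaves n arr f
            (pvCalc calced (PySem.List.pyGetD arr idx 0) (i : Int)) (idx + 1)
            (rem.set i (PySem.List.pyGetD rem (i : Int) 0 - 1))
        else acc) [] := by
  conv_lhs => unfold pvLeaves
  simp [h]

-- generic: conditional-append foldl is acc0 ++ flatMap
theorem foldl_ifapp {α β : Type} (p : α → Prop) [DecidablePred p] (f : α → List β) :
    ∀ (L : List α) (acc0 : List β),
      L.foldl (fun acc i => if p i then acc ++ f i else acc) acc0 =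
        acc0 ++ L.flatMap (fun i => if p i then f i else []) := by
  intro L
  induction L with
  | nil => intro acc0; simp
  | cons x xs ih =>
    intro acc0
    simp only [List.foldl_cons, List.flatMap_cons]
    by_cases h : p x
    · simp [h, ih]
    · simp [h, ih]

theorem foldl_app {α β : Type} (f : α → List β) :
    ∀ (L : List α) (acc0 : List β),
      L.foldl (fun acc i => acc ++ f i) acc0 = acc0 ++ L.flatMap f := by
  intro L
  induction L with
  | nil => intro acc0; simp
  | cons x xs ih => intro acc0; simp [ih]

theorem foldl_congr2 {α β : Type} {f g : β → α → β} (h : ∀ b a, f b a = g b a) :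
    ∀ (L : List α) (b : β), L.foldl f b = L.foldl g b := by
  intro L
  induction L with
  | nil => intro b; rfl
  | cons x xs ih => intro b; rw [List.foldl_cons, List.foldl_cons, h, ih]

theorem map_flatMap2 {α β γ : Type} (f : β → γ) (g : α → List β) :
    ∀ L : List α, (L.flatMap g).map f = L.flatMap (fun a => (g a).map f) := by
  intro L
  induction L with
  | nil => rfl
  | cons x xs ih => simp [ih]

-- characterisation of A's step: result = fold of max/min over the DFS leaf values
theorem step_char (n : Int) (arr : List Int) :
    ∀ (fuel : Nat) (calced idx : Int) (rem : List Int) (mx mn : Int),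
      computeStep n arr fuel calced idx rem mx mn =
        ((pvLeaves n arr fuel calced idx rem).foldl pvFMax mx,
         (pvLeaves n arr fuel calced idx rem).foldl pvFMin mn) := by
  intro fuel
  induction fuel with
  | zero =>
    intro calced idx rem mx mn
    by_cases h : idx = n
    · rw [computeStep_base n arr 0 calced idx rem mx mn h, pvLeaves_base n arr 0 calced idx rem h]
      simp [pvFMax, pvFMin]
    · rw [computeStep_zero n arr calced idx rem mx mn h, pvLeaves_zero n arr calced idx rem h]
      simp
  | succ f ih =>
    intro calced idx rem mx mn
    by_cases h : idx = n
    · rw [computeStep_base n arr (f + 1) calced idx rem mx mn h,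
        pvLeaves_base n arr (f + 1) calced idx rem h]
      simp [pvFMax, pvFMin]
    · rw [computeStep_succ n arr f calced idx rem mx mn h,
        pvLeaves_succ n arr f calced idx rem h]
      rw [foldl_ifapp (fun (i : Nat) => PySem.List.pyGetD rem (i : Int) 0 ≠ 0)
        (fun (i : Nat) => pvLeaves n arr f (pvCalc calced (PySem.List.pyGetD arr idx 0) (i : Int)) (idx + 1)
          (rem.set i (PySem.List.pyGetD rem (i : Int) 0 - 1))) (List.range 4) []]
      rw [List.nil_append]
      -- generalize over the op list, then induct on it
      have H : ∀ (L : List Nat) (acc : Int × Int),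
          L.foldl (fun (acc : Int × Int) (i : Nat) =>
            if PySem.List.pyGetD rem (i : Int) 0 ≠ 0 then
              let res := computeStep n arr f
                (pvCalc calced (PySem.List.pyGetD arr idx 0) (i : Int)) (idx + 1)
                (rem.set i (PySem.List.pyGetD rem (i : Int) 0 - 1)) acc.1 acc.2
              (if acc.1 < res.1 then res.1 else acc.1, if acc.2 > res.2 then res.2 else acc.2)
            else acc) acc =
          ((L.flatMap (fun (i : Nat) => if PySem.List.pyGetD rem (i : Int) 0 ≠ 0 then
              pvLeaves n arr f (pvCalc calced (PySem.List.pyGetD arr idx 0) (i : Int)) (idx + 1)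
                (rem.set i (PySem.List.pyGetD rem (i : Int) 0 - 1))
            else [])).foldl pvFMax acc.1,
           (L.flatMap (fun (i : Nat) => if PySem.List.pyGetD rem (i : Int) 0 ≠ 0 then
              pvLeaves n arr f (pvCalc calced (PySem.List.pyGetD arr idx 0) (i : Int)) (idx + 1)
                (rem.set i (PySem.List.pyGetD rem (i : Int) 0 - 1))
            else [])).foldl pvFMin acc.2) := by
        intro L
        induction L with
        | nil => intro acc; simp
        | cons x xs ihL =>
          intro acc
          rw [List.foldl_cons, ihL, List.flatMap_cons]
          by_cases hx : PySem.List.pyGetD rem (x : Int) 0 ≠ 0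
          · simp only [if_pos hx, ih, List.foldl_append]
            have e1 : (if acc.1 < (pvLeaves n arr f (pvCalc calced (PySem.List.pyGetD arr idx 0) (x : Int)) (idx + 1) (rem.set x (PySem.List.pyGetD rem (x : Int) 0 - 1))).foldl pvFMax acc.1
                  then (pvLeaves n arr f (pvCalc calced (PySem.List.pyGetD arr idx 0) (x : Int)) (idx + 1) (rem.set x (PySem.List.pyGetD rem (x : Int) 0 - 1))).foldl pvFMax acc.1
                  else acc.1) =
                (pvLeaves n arr f (pvCalc calced (PySem.List.pyGetD arr idx 0) (x : Int)) (idx + 1) (rem.set x (PySem.List.pyGetD rem (x : Int) 0 - 1))).foldl pvFMax acc.1 := by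
              have := le_foldl_fMax (pvLeaves n arr f (pvCalc calced (PySem.List.pyGetD arr idx 0) (x : Int)) (idx + 1) (rem.set x (PySem.List.pyGetD rem (x : Int) 0 - 1))) acc.1
              split <;> omega
            have e2 : (if acc.2 > (pvLeaves n arr f (pvCalc calced (PySem.List.pyGetD arr idx 0) (x : Int)) (idx + 1) (rem.set x (PySem.List.pyGetD rem (x : Int) 0 - 1))).foldl pvFMin acc.2
                  then (pvLeaves n arr f (pvCalc calced (PySem.List.pyGetD arr idx 0) (x : Int)) (idx + 1) (rem.set x (PySem.List.pyGetD rem (x : Int) 0 - 1))).foldl pvFMin acc.2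
                  else acc.2) =
                (pvLeaves n arr f (pvCalc calced (PySem.List.pyGetD arr idx 0) (x : Int)) (idx + 1) (rem.set x (PySem.List.pyGetD rem (x : Int) 0 - 1))).foldl pvFMin acc.2 := by
              have := foldl_fMin_le (pvLeaves n arr f (pvCalc calced (PySem.List.pyGetD arr idx 0) (x : Int)) (idx + 1) (rem.set x (PySem.List.pyGetD rem (x : Int) 0 - 1))) acc.2
              split <;> omega
            rw [e1, e2]
          · simp only [if_neg hx, List.nil_append]
      rw [H (List.range 4) (mx, mn)]

-- B's one-position expansion step (identical lambda to the one inside compute_alt)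
def pvExpand (arr : List Int) (states : List (Int × List Int)) (idx : Int) : List (Int × List Int) :=
  states.foldl (fun nxt vc =>
    (List.range 4).foldl (fun nxt (i : Nat) =>
      if PySem.List.pyGetD vc.2 (i : Int) 0 ≠ 0 then
        nxt ++ [(pvCalc vc.1 (PySem.List.pyGetD arr idx 0) (i : Int), vc.2.set i (PySem.List.pyGetD vc.2 (i : Int) 0 - 1))]
      else nxt) nxt) []

def pvChildren (arr : List Int) (idx : Int) (vc : Int × List Int) : List (Int × List Int) :=
  (List.range 4).flatMap (fun (i : Nat) =>
    if PySem.List.pyGetD vc.2 (i : Int) 0 ≠ 0 then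
      [(pvCalc vc.1 (PySem.List.pyGetD arr idx 0) (i : Int), vc.2.set i (PySem.List.pyGetD vc.2 (i : Int) 0 - 1))]
    else [])

def pvRun (arr : List Int) (ps : List Int) (S : List (Int × List Int)) : List (Int × List Int) :=
  ps.foldl (fun S idx => pvExpand arr S idx) S

theorem pvExpand_eq (arr : List Int) (S : List (Int × List Int)) (idx : Int) :
    pvExpand arr S idx = S.flatMap (pvChildren arr idx) := by
  unfold pvExpand
  have hpt : ∀ (nxt : List (Int × List Int)) (vc : Int × List Int),
      (List.range 4).foldl (fun nxt (i : Nat) =>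
        if PySem.List.pyGetD vc.2 (i : Int) 0 ≠ 0 then
          nxt ++ [(pvCalc vc.1 (PySem.List.pyGetD arr idx 0) (i : Int), vc.2.set i (PySem.List.pyGetD vc.2 (i : Int) 0 - 1))]
        else nxt) nxt = nxt ++ pvChildren arr idx vc := by
    intro nxt vc
    unfold pvChildren
    exact foldl_ifapp (fun (i : Nat) => PySem.List.pyGetD vc.2 (i : Int) 0 ≠ 0)
      (fun (i : Nat) => [(pvCalc vc.1 (PySem.List.pyGetD arr idx 0) (i : Int), vc.2.set i (PySem.List.pyGetD vc.2 (i : Int) 0 - 1))])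
      (List.range 4) nxt
  rw [foldl_congr2 hpt S [], foldl_app (pvChildren arr idx) S []]
  simp

theorem pvExpand_append (arr : List Int) (S1 S2 : List (Int × List Int)) (idx : Int) :
    pvExpand arr (S1 ++ S2) idx = pvExpand arr S1 idx ++ pvExpand arr S2 idx := by
  simp [pvExpand_eq]

theorem pvExpand_nil (arr : List Int) (idx : Int) : pvExpand arr [] idx = [] := by
  simp [pvExpand_eq]

theorem pvRun_append (arr : List Int) :
    ∀ (ps : List Int) (S1 S2 : List (Int × List Int)),
      pvRun arr ps (S1 ++ S2) = pvRun arr ps S1 ++ pvRun arr ps S2 := by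
  intro ps
  induction ps with
  | nil => intro S1 S2; rfl
  | cons p ps ih =>
    intro S1 S2
    show pvRun arr ps (pvExpand arr (S1 ++ S2) p) =
      pvRun arr ps (pvExpand arr S1 p) ++ pvRun arr ps (pvExpand arr S2 p)
    rw [pvExpand_append, ih]

theorem pvRun_nil (arr : List Int) : ∀ (ps : List Int), pvRun arr ps [] = [] := by
  intro ps
  induction ps with
  | nil => rfl
  | cons p ps ih =>
    show pvRun arr ps (pvExpand arr [] p) = []
    rw [pvExpand_nil]; exact ih

theorem pvRun_flatMap {α : Type} (arr : List Int) (ps : List Int) (f : α → List (Int × List Int)) :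
    ∀ (L : List α), pvRun arr ps (L.flatMap f) = L.flatMap (fun x => pvRun arr ps (f x)) := by
  intro L
  induction L with
  | nil => simp [pvRun_nil]
  | cons x xs ih => simp [pvRun_append, ih]

-- characterisation of B's BFS frontier: its values are the DFS leaf values, in order
theorem bfs_char (n : Int) (arr : List Int) :
    ∀ (fuel : Nat) (idx calced : Int) (rem : List Int), idx ≤ n → fuel = (n - idx).toNat →
      (pvRun arr (PySem.List.pyRange idx n 1) [(calced, rem)]).map Prod.fst =
        pvLeaves n arr fuel calced idx rem := by
  intro fuel
  induction fuel with
  | zero =>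
    intro idx calced rem hle hfuel
    have hidx : idx = n := by omega
    subst hidx
    rw [PySem.List.pyRange_one_eq_nil (le_refl idx), pvLeaves_base idx arr 0 calced idx rem rfl]
    simp [pvRun]
  | succ f ih =>
    intro idx calced rem hle hfuel
    have hlt : idx < n := by omega
    rw [PySem.List.pyRange_one_cons hlt]
    have hrun : pvRun arr (idx :: PySem.List.pyRange (idx + 1) n 1) [(calced, rem)] =
        pvRun arr (PySem.List.pyRange (idx + 1) n 1) (pvExpand arr [(calced, rem)] idx) := rfl
    rw [hrun, pvExpand_eq]
    rw [show ([(calced, rem)] : List (Int × List Int)).flatMap (pvChildren arr idx) =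
      pvChildren arr idx (calced, rem) by simp]
    unfold pvChildren
    rw [pvRun_flatMap, map_flatMap2]
    rw [pvLeaves_succ n arr f calced idx rem (by omega)]
    rw [foldl_ifapp (fun (i : Nat) => PySem.List.pyGetD rem (i : Int) 0 ≠ 0)
      (fun (i : Nat) => pvLeaves n arr f (pvCalc calced (PySem.List.pyGetD arr idx 0) (i : Int)) (idx + 1)
        (rem.set i (PySem.List.pyGetD rem (i : Int) 0 - 1))) (List.range 4) []]
    rw [List.nil_append]
    congr 1
    funext i
    by_cases hi : PySem.List.pyGetD rem (i : Int) 0 ≠ 0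
    · simp only [if_pos hi]
      exact ih (idx + 1) (pvCalc calced (PySem.List.pyGetD arr idx 0) (i : Int))
        (rem.set i (PySem.List.pyGetD rem (i : Int) 0 - 1)) (by omega) (by omega)
    · simp only [if_neg hi]
      rw [pvRun_nil]
      rfl

-- B's final reduction = fold of max/min over the frontier values
theorem reduce_char :
    ∀ (S : List (Int × List Int)) (a b : Int),
      S.foldl (fun (acc : Int × Int) vc =>
        (if acc.1 < vc.1 then vc.1 else acc.1, if acc.2 > vc.1 then vc.1 else acc.2)) (a, b) =
        ((S.map Prod.fst).foldl pvFMax a, (S.map Prod.fst).foldl pvFMin b) := by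
  intro S
  induction S with
  | nil => intro a b; simp
  | cons vc S ih => intro a b; simp [pvFMax, pvFMin, ih]

-- ===== VERDICT (by name: the statement is the Claim_ definition above) =====
theorem compute_spec : Claim_equal_compute := by
  intro n arr remains _ hpre
  obtain ⟨h1, -, -, -⟩ := hpre
  unfold Spec_compute
  have ha : compute n arr remains =
      computeStep n arr (n - 1).toNat (PySem.List.pyGetD arr 0 0) 1 remains pvMIN pvMAX := rfl
  have hb : compute_alt n arr remains =
      (pvRun arr (PySem.List.pyRange 1 n 1) [(PySem.List.pyGetD arr 0 0, remains)]).foldl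
        (fun (acc : Int × Int) vc =>
          (if acc.1 < vc.1 then vc.1 else acc.1, if acc.2 > vc.1 then vc.1 else acc.2))
        (pvMIN, pvMAX) := rfl
  rw [ha, hb, step_char, reduce_char,
    bfs_char n arr ((n - 1).toNat) 1 (PySem.List.pyGetD arr 0 0) remains h1 rfl]
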